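-- pv_equiv track=rewrite | github.com/fallangelli/zeus_trade | base_math.py | last_greater_0
-- ===== SOURCE A (Python) =====
-- def last_greater_0(x: list):
--     size = len(x)
--     ret_val = -1
--     if size <= 1 or x[0] >= 0:
--         ret_val = -1
--
--     i = 1
--     while i < size - 1:
--         if x[i] >= 0:
--             ret_val = i
--         i = i + 1
--
--     return ret_val
-- ===== SOURCE B (Python) =====
-- def last_greater_0(x: list):
--     for i in range(len(x) - 2, 0, -1):
--         if x[i] >= 0:
--             return i
--     return -1
-- ===== Notes on version B (the rewrite author's own statement) =====
-- stated objective: idiomatic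
-- what changed: Replaces the forward accumulate-last-match while-loop (with a dead initial if) by a reverse for-loop over range(len(x)-2, 0, -1) that returns the first qualifying index from the right (early-return backward search).
import Mathlib
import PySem

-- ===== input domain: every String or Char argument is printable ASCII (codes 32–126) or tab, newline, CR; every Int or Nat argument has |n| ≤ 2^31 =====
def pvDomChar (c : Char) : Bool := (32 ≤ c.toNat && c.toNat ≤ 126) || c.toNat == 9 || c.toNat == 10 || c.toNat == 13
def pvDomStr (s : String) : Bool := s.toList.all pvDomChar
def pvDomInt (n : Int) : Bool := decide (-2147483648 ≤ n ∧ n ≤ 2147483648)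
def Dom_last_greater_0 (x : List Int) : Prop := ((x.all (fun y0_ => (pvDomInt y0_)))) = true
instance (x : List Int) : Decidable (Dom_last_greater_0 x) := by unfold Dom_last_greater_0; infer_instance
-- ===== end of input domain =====

-- B replaces A's forward accumulate-last-match loop by a reverse early-return search (idiomatic; same cost).

-- ===== PORT A =====
-- indices read in the loop are always in range (1 ≤ i < size-1), so .getD 0 is never taken
def last_greater_0 (x : List Int) : Int :=
  let size : Int := x.length
  let ret_val : Int := -1
  let ret_val : Int :=
    if size ≤ 1 ∨ (PySem.List.pyGet? x 0).getD 0 ≥ 0 then -1 else ret_val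
  (PySem.List.pyRange 1 (size - 1) 1).foldl
    (fun rv i => if (PySem.List.pyGet? x i).getD 0 ≥ 0 then i else rv) ret_val

-- ===== PORT B =====
-- the for-loop with early return, as structural recursion on the countdown range
def lg0AltLoop (x : List Int) : List Int → Int
  | [] => -1
  | i :: rest => if (PySem.List.pyGet? x i).getD 0 ≥ 0 then i else lg0AltLoop x rest

def last_greater_0_alt (x : List Int) : Int :=
  lg0AltLoop x (PySem.List.pyRange ((x.length : Int) - 2) 0 (-1))

-- ===== PRECONDITION & SPEC =====
def Spec_last_greater_0 (x : List Int) (out : Int) : Prop := out = last_greater_0_alt x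
instance (x : List Int) (out : Int) : Decidable (Spec_last_greater_0 x out) := by unfold Spec_last_greater_0; infer_instance

-- ===== CLAIM (what is proved, stated in full; the proofs are below) =====
def Claim_equal_last_greater_0 : Prop := ∀ (x : List Int), Dom_last_greater_0 x → Spec_last_greater_0 x (last_greater_0 x)

-- ===== LEMMAS AND PROOFS =====
lemma lg0_loop_eq (x : List Int) (r : List Int) :
    r.reverse.foldl (fun rv i => if (PySem.List.pyGet? x i).getD 0 ≥ 0 then i else rv) (-1)
      = lg0AltLoop x r := by
  induction r with
  | nil => simp [lg0AltLoop]
  | cons i rest ih =>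
    simp only [List.reverse_cons, List.foldl_append, List.foldl_cons, List.foldl_nil, lg0AltLoop]
    split <;> simp [ih]

-- ===== VERDICT (by name: the statement is the Claim_ definition above) =====
theorem last_greater_0_spec : Claim_equal_last_greater_0 := by
  intro x _
  unfold Spec_last_greater_0 last_greater_0 last_greater_0_alt
  have hrev : PySem.List.pyRange ((x.length : Int) - 2) 0 (-1)
      = (PySem.List.pyRange 1 ((x.length : Int) - 1) 1).reverse := by
    rw [PySem.List.pyRange_neg_one_eq_reverse]
    have h : (x.length : Int) - 2 + 1 = (x.length : Int) - 1 := by ring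
    norm_num [h]
  rw [hrev, ← lg0_loop_eq x]
  simp only [List.reverse_reverse]
  split <;> rfl
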